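-- pv_equiv track=rewrite | github.com/Zishan-IA/TV-Intelligence | prepare_dashboard_data.py | compute_freq_dist
-- ===== SOURCE A (Python) =====
-- def compute_freq_dist(freq_dict):
--     """Turn {device: count} → standard 5-bucket distribution dict."""
--     fc = freq_dict.values()
--     return {
--         "1":    sum(1 for c in fc if c == 1),
--         "2-3":  sum(1 for c in fc if 2 <= c <= 3),
--         "4-6":  sum(1 for c in fc if 4 <= c <= 6),
--         "7-10": sum(1 for c in fc if 7 <= c <= 10),
--         "11+":  sum(1 for c in fc if c >= 11),
--     }
-- ===== SOURCE B (Python) =====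
-- def compute_freq_dist(freq_dict):
--     """Turn {device: count} -> standard 5-bucket distribution dict, one pass."""
--     result = {"1": 0, "2-3": 0, "4-6": 0, "7-10": 0, "11+": 0}
--     for c in freq_dict.values():
--         if c == 1:
--             result["1"] += 1
--         elif 2 <= c <= 3:
--             result["2-3"] += 1
--         elif 4 <= c <= 6:
--             result["4-6"] += 1
--         elif 7 <= c <= 10:
--             result["7-10"] += 1
--         elif c >= 11:
--             result["11+"] += 1
--     return result
-- ===== Notes on version B (the rewrite author's own statement) =====
-- stated objective: simpler
-- what changed: Replaces five separate generator-expression scans of the values with a single pass that increments exactly one bucket via an if/elif chain.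
import Mathlib
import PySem

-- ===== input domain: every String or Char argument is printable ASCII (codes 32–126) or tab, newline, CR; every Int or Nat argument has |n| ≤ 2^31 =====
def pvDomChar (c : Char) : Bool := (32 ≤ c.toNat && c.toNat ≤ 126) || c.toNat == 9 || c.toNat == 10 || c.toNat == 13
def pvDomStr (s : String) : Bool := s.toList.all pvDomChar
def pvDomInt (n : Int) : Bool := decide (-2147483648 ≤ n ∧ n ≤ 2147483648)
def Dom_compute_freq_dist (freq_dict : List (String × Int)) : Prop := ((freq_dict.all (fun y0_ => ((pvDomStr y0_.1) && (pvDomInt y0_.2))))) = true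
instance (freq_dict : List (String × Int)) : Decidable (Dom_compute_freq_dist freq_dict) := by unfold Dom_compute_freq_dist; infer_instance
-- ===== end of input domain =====

-- B replaces A's five separate scans of the values with a single pass that
-- increments exactly one bucket per value (objective: simpler).

-- ===== PORT A =====
-- sum(1 for c in fc if p c)
def pvSumIf (fc : List Int) (p : Int → Bool) : Int :=
  fc.foldl (fun acc c => if p c then acc + 1 else acc) 0

def compute_freq_dist (freq_dict : List (String × Int)) : List (String × Int) :=
  let fc := freq_dict.map (·.2)
  [ ("1",    pvSumIf fc (fun c => c == 1)),
    ("2-3",  pvSumIf fc (fun c => 2 ≤ c && c ≤ 3)),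
    ("4-6",  pvSumIf fc (fun c => 4 ≤ c && c ≤ 6)),
    ("7-10", pvSumIf fc (fun c => 7 ≤ c && c ≤ 10)),
    ("11+",  pvSumIf fc (fun c => 11 ≤ c)) ]

-- ===== PORT B =====
-- the loop body: one if/elif chain incrementing exactly one bucket
def pvStep (r : PySem.Dict String Int) (c : Int) : PySem.Dict String Int :=
  if c == 1 then r.modify "1" 0 (· + 1)
  else if 2 ≤ c && c ≤ 3 then r.modify "2-3" 0 (· + 1)
  else if 4 ≤ c && c ≤ 6 then r.modify "4-6" 0 (· + 1)
  else if 7 ≤ c && c ≤ 10 then r.modify "7-10" 0 (· + 1)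
  else if 11 ≤ c then r.modify "11+" 0 (· + 1)
  else r

def compute_freq_dist_alt (freq_dict : List (String × Int)) : List (String × Int) :=
  let result : PySem.Dict String Int :=
    PySem.Dict.ofList [("1",0),("2-3",0),("4-6",0),("7-10",0),("11+",0)]
  ((freq_dict.map (·.2)).foldl pvStep result).items

-- ===== PRECONDITION & SPEC =====
def Spec_compute_freq_dist (freq_dict : List (String × Int)) (out : List (String × Int)) : Prop := out = compute_freq_dist_alt freq_dict
instance (freq_dict : List (String × Int)) (out : List (String × Int)) : Decidable (Spec_compute_freq_dist freq_dict out) := by unfold Spec_compute_freq_dist; infer_instance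

-- ===== CLAIM (what is proved, stated in full; the proofs are below) =====
def Claim_equal_compute_freq_dist : Prop := ∀ (freq_dict : List (String × Int)), Dom_compute_freq_dist freq_dict → Spec_compute_freq_dist freq_dict (compute_freq_dist freq_dict)

-- ===== LEMMAS AND PROOFS =====

theorem pvSumIf_shift (l : List Int) (p : Int → Bool) (n : Int) :
    l.foldl (fun acc c => if p c then acc + 1 else acc) n = n + pvSumIf l p := by
  induction l generalizing n with
  | nil => simp [pvSumIf]
  | cons x xs ih =>
      simp only [pvSumIf, List.foldl_cons]
      rw [ih, ih]
      split <;> omega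

theorem pvSumIf_cons (x : Int) (l : List Int) (p : Int → Bool) :
    pvSumIf (x :: l) p = (if p x then 1 else 0) + pvSumIf l p := by
  simp only [pvSumIf, List.foldl_cons]
  rw [pvSumIf_shift]
  split <;> simp [pvSumIf]

def pvD (a b c d e : Int) : PySem.Dict String Int :=
  PySem.Dict.ofList [("1",a),("2-3",b),("4-6",c),("7-10",d),("11+",e)]

theorem pvD_m1 (a b c d e : Int) : (pvD a b c d e).modify "1" 0 (· + 1) = pvD (a+1) b c d e := by
  simp [pvD, PySem.Dict.ofList, PySem.Dict.modify, PySem.Dict.update, PySem.Dict.insert, PySem.Dict.getD, PySem.Dict.get?, PySem.Dict.empty, List.foldl]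

theorem pvD_m2 (a b c d e : Int) : (pvD a b c d e).modify "2-3" 0 (· + 1) = pvD a (b+1) c d e := by
  simp [pvD, PySem.Dict.ofList, PySem.Dict.modify, PySem.Dict.update, PySem.Dict.insert, PySem.Dict.getD, PySem.Dict.get?, PySem.Dict.empty, List.foldl]

theorem pvD_m3 (a b c d e : Int) : (pvD a b c d e).modify "4-6" 0 (· + 1) = pvD a b (c+1) d e := by
  simp [pvD, PySem.Dict.ofList, PySem.Dict.modify, PySem.Dict.update, PySem.Dict.insert, PySem.Dict.getD, PySem.Dict.get?, PySem.Dict.empty, List.foldl]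

theorem pvD_m4 (a b c d e : Int) : (pvD a b c d e).modify "7-10" 0 (· + 1) = pvD a b c (d+1) e := by
  simp [pvD, PySem.Dict.ofList, PySem.Dict.modify, PySem.Dict.update, PySem.Dict.insert, PySem.Dict.getD, PySem.Dict.get?, PySem.Dict.empty, List.foldl]

theorem pvD_m5 (a b c d e : Int) : (pvD a b c d e).modify "11+" 0 (· + 1) = pvD a b c d (e+1) := by
  simp [pvD, PySem.Dict.ofList, PySem.Dict.modify, PySem.Dict.update, PySem.Dict.insert, PySem.Dict.getD, PySem.Dict.get?, PySem.Dict.empty, List.foldl]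

theorem pvD_items (a b c d e : Int) :
    (pvD a b c d e).items = [("1",a),("2-3",b),("4-6",c),("7-10",d),("11+",e)] := by
  simp [pvD, PySem.Dict.ofList, PySem.Dict.update, PySem.Dict.insert, PySem.Dict.empty, List.foldl]

theorem pv_loop (l : List Int) (a b c d e : Int) :
    (l.foldl pvStep (pvD a b c d e)).items
      = [ ("1",    a + pvSumIf l (fun v => v == 1)),
          ("2-3",  b + pvSumIf l (fun v => 2 ≤ v && v ≤ 3)),
          ("4-6",  c + pvSumIf l (fun v => 4 ≤ v && v ≤ 6)),
          ("7-10", d + pvSumIf l (fun v => 7 ≤ v && v ≤ 10)),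
          ("11+",  e + pvSumIf l (fun v => 11 ≤ v)) ] := by
  induction l generalizing a b c d e with
  | nil => simp [pvSumIf, pvD_items]
  | cons x xs ih =>
      simp only [List.foldl_cons, pvStep, pvSumIf_cons]
      split_ifs with h1 h2 h3 h4 h5 <;>
        simp_all [pvD_m1, pvD_m2, pvD_m3, pvD_m4, pvD_m5] <;> omega

-- ===== VERDICT (by name: the statement is the Claim_ definition above) =====
theorem compute_freq_dist_spec : Claim_equal_compute_freq_dist := by
  intro fd _
  show compute_freq_dist fd = compute_freq_dist_alt fd
  show _ = ((fd.map (·.2)).foldl pvStep (pvD 0 0 0 0 0)).items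
  rw [pv_loop]
  simp [compute_freq_dist]
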